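-- pv_equiv track=rewrite | github.com/yfding98/EEG_SUAT | raw_data_scripts/extract_selected_segments.py | parse_channel_names_from_filename
-- ===== SOURCE A (Python) =====
-- def parse_channel_names_from_filename(filename):
--     """
--     从文件名中解析被标记的通道名称
--
--     例如: SZ2_postICA_fast_reject_T4_F8_Sph_R.set
--     -> ['T4', 'F8', 'Sph-R']
--
--     参数:
--         filename: 文件名
--
--     返回:
--         channels: 通道名称列表
--     """
--     # 移除.set后缀
--     name = filename.replace('.set', '')
--
--     # 找到_fast_reject_的位置
--     if '_fast_reject_' not in name:
--         return []
--
--     # 提取_fast_reject_之后的部分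
--     suffix = name.split('_fast_reject_')[1]
--
--     # 按下划线分割得到通道名
--     # 注意: Sph_R 需要恢复为 Sph-R
--     parts = suffix.split('_')
--
--     channels = []
--     i = 0
--     while i < len(parts):
--         # 检查是否是 Sph/R 这种模式（应该合并为Sph-R）
--         if i + 1 < len(parts) and parts[i] in ['Sph', 'Sphe'] and parts[i+1] in ['L', 'R']:
--             channels.append(f"{parts[i]}-{parts[i+1]}")
--             i += 2
--         else:
--             channels.append(parts[i])
--             i += 1
--
--     return channels
-- ===== SOURCE B (Python) =====
-- def parse_channel_names_from_filename(filename):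
--     # Same result; instead of split('_') plus an index/lookahead merge loop,
--     # B parses the suffix character by character with a small state machine
--     # (current token, a pending Sph/Sphe token awaiting a possible L/R).
--     name = filename.replace('.set', '')
--     if '_fast_reject_' not in name:
--         return []
--     suffix = name.split('_fast_reject_')[1]
--     channels = []
--     tok = ''
--     pending = None
--     for c in suffix + '_':
--         if c != '_':
--             tok += c
--             continue
--         # token boundary: decide what to do with tok
--         if pending is not None:
--             if tok in ('L', 'R'):
--                 channels.append(pending + '-' + tok)
--                 pending = None
--             else:
--                 channels.append(pending)
--                 if tok in ('Sph', 'Sphe'):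
--                     pending = tok
--                 else:
--                     channels.append(tok)
--                     pending = None
--         else:
--             if tok in ('Sph', 'Sphe'):
--                 pending = tok
--             else:
--                 channels.append(tok)
--         tok = ''
--     if pending is not None:
--         channels.append(pending)
--     return channels
-- ===== Notes on version B (the rewrite author's own statement) =====
-- stated objective: alternative
-- what changed: A splits the suffix into tokens and then merges Sph/Sphe+L/R pairs with an index-based lookahead while-loop; B never runs that loop: it parses the suffix character by character with a state machine (current token plus a pending Sph/Sphe awaiting a possible L/R), emitting channels at each underscore boundary.
import Mathlib
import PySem

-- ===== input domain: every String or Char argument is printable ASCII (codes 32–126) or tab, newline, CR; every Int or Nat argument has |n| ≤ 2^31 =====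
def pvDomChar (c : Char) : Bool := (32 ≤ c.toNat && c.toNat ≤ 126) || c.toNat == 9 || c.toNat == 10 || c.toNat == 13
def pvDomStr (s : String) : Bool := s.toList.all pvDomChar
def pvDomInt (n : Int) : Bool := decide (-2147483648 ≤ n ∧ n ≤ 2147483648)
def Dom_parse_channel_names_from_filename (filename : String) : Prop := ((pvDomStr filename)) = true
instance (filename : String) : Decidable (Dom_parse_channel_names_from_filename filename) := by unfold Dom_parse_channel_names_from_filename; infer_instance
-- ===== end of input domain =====

-- B replaces A's split-then-merge token loop by a single character-level state
-- machine over the suffix (current token + pending Sph/Sphe); objective: alternative.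

-- ===== PORT A =====
-- A's while-loop over `parts` with index i and lookahead parts[i+1]
def pvLoopA : List String → List String
  | [] => []
  | [p] => [p]
  | p :: q :: rest =>
    if ((p == "Sph") || (p == "Sphe")) && ((q == "L") || (q == "R")) then
      (p ++ "-" ++ q) :: pvLoopA rest
    else
      p :: pvLoopA (q :: rest)

def parse_channel_names_from_filename (filename : String) : List String :=
  let name := PySem.Str.replace filename ".set" ""
  if PySem.Str.isIn "_fast_reject_" name then
    -- the guard guarantees split yields ≥ 2 pieces, so index 1 exists; getD "" is unreachable
    let suffix := (PySem.List.pyGet? ((PySem.Str.split? name "_fast_reject_").getD []) 1).getD ""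
    pvLoopA ((PySem.Str.split? suffix "_").getD [])
  else []

-- ===== PORT B =====
-- one step of Source B's `for c in suffix + '_'` loop; state = (channels, tok, pending)
def pvStepB (st : List String × List Char × Option String) (c : Char) :
    List String × List Char × Option String :=
  if c != '_' then (st.1, st.2.1 ++ [c], st.2.2)
  else
    let tok := st.2.1
    match st.2.2 with
    | some p =>
      if tok == "L".toList || tok == "R".toList then (st.1 ++ [p ++ "-" ++ String.ofList tok], [], none)
      else if tok == "Sph".toList || tok == "Sphe".toList then (st.1 ++ [p], [], some (String.ofList tok))
      else (st.1 ++ [p, String.ofList tok], [], none)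
    | none =>
      if tok == "Sph".toList || tok == "Sphe".toList then (st.1, [], some (String.ofList tok))
      else (st.1 ++ [String.ofList tok], [], none)

-- Source B's final `if pending is not None: channels.append(pending)`
def pvFinishB (st : List String × List Char × Option String) : List String :=
  match st.2.2 with
  | some p => st.1 ++ [p]
  | none => st.1

def parse_channel_names_from_filename_alt (filename : String) : List String :=
  let name := PySem.Str.replace filename ".set" ""
  if PySem.Str.isIn "_fast_reject_" name then
    let suffix := (PySem.List.pyGet? ((PySem.Str.split? name "_fast_reject_").getD []) 1).getD ""
    pvFinishB ((suffix.toList ++ ['_']).foldl pvStepB ([], [], none))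
  else []

-- ===== PRECONDITION & SPEC =====
def Spec_parse_channel_names_from_filename (filename : String) (out : List String) : Prop := out = parse_channel_names_from_filename_alt filename
instance (filename : String) (out : List String) : Decidable (Spec_parse_channel_names_from_filename filename out) := by unfold Spec_parse_channel_names_from_filename; infer_instance

-- ===== CLAIM (what is proved, stated in full; the proofs are below) =====
def Claim_equal_parse_channel_names_from_filename : Prop := ∀ (filename : String), Dom_parse_channel_names_from_filename filename → Spec_parse_channel_names_from_filename filename (parse_channel_names_from_filename filename)

-- ===== LEMMAS AND PROOFS =====

-- proof-only: splitting a char list on '_' with an in-order accumulator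
def pvSplit (pre : List Char) : List Char → List (List Char)
  | [] => [pre]
  | c :: rest => if c = '_' then pre :: pvSplit [] rest else pvSplit (pre ++ [c]) rest

lemma pv_go_spec : ∀ (fuel : Nat) (l cur : List Char) (acc : List (List Char)), l.length ≤ fuel →
    PySem.Chars.splitOn.go ['_'] fuel l cur acc = acc.reverse ++ pvSplit cur.reverse l := by
  intro fuel
  induction fuel with
  | zero =>
    intro l cur acc h
    have : l = [] := List.eq_nil_of_length_eq_zero (Nat.le_zero.mp h)
    subst this
    simp [PySem.Chars.splitOn.go, pvSplit]
  | succ f ih =>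
    intro l cur acc h
    cases l with
    | nil => simp [PySem.Chars.splitOn.go, pvSplit]
    | cons c rest =>
      by_cases hc : c = '_'
      · subst hc
        rw [PySem.Chars.splitOn.go, if_pos (by simp [List.isPrefixOf])]
        simp only [List.length_cons, Nat.add_le_add_iff_right] at h
        simp only [List.length_singleton, List.drop_one, List.tail_cons]
        rw [ih rest [] _ (by omega)]
        simp [pvSplit]
      · rw [PySem.Chars.splitOn.go,
          if_neg (by simp [List.isPrefixOf]; exact fun h' => absurd h'.symm hc)]
        simp only [List.length_cons, Nat.add_le_add_iff_right] at h
        rw [ih rest (c :: cur) acc (by omega)]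
        simp [pvSplit, hc]

lemma pv_splitOn_eq (s : List Char) : PySem.Chars.splitOn s ['_'] = pvSplit [] s := by
  rw [PySem.Chars.splitOn, pv_go_spec _ _ _ _ (by omega)]
  simp

lemma pv_ofList_beq (t : List Char) (s : String) : (String.ofList t == s) = (t == s.toList) := by
  by_cases h : t = s.toList
  · subst h; simp [String.ofList_toList]
  · have hne : String.ofList t ≠ s := fun he => h (by simpa using congrArg String.toList he)
    simp [h, hne]

-- proof-only: Source B's boundary action at the token level
def pvTokStep (st : List String × Option String) (t : List Char) : List String × Option String :=
  match st.2 with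
  | some p =>
    if t == "L".toList || t == "R".toList then (st.1 ++ [p ++ "-" ++ String.ofList t], none)
    else if t == "Sph".toList || t == "Sphe".toList then (st.1 ++ [p], some (String.ofList t))
    else (st.1 ++ [p, String.ofList t], none)
  | none =>
    if t == "Sph".toList || t == "Sphe".toList then (st.1, some (String.ofList t))
    else (st.1 ++ [String.ofList t], none)

-- the char machine over l ++ ['_'] is the token fold over pvSplit
lemma pv_machine_eq : ∀ (l cur : List Char) (ch : List String) (pending : Option String),
    (l ++ ['_']).foldl pvStepB (ch, cur, pending) =
      (((pvSplit cur l).foldl pvTokStep (ch, pending)).1, [],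
        ((pvSplit cur l).foldl pvTokStep (ch, pending)).2) := by
  intro l
  induction l with
  | nil =>
    intro cur ch pending
    simp only [List.nil_append, List.foldl_cons, List.foldl_nil, pvSplit]
    cases pending <;> simp [pvStepB, pvTokStep] <;> split_ifs <;> rfl
  | cons c rest ih =>
    intro cur ch pending
    by_cases hc : c = '_'
    · subst hc
      simp only [List.cons_append, List.foldl_cons, pvSplit]
      have hstep : pvStepB (ch, cur, pending) '_' =
          ((pvTokStep (ch, pending) cur).1, [], (pvTokStep (ch, pending) cur).2) := by
        cases pending <;> simp [pvStepB, pvTokStep] <;> split_ifs <;> rfl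
      rw [hstep, ih]
      simp
    · simp only [List.cons_append, List.foldl_cons, pvSplit, if_neg hc]
      have hstep : pvStepB (ch, cur, pending) c = (ch, cur ++ [c], pending) := by
        simp [pvStepB, hc]
      rw [hstep, ih]

-- flushing the token fold yields A's merge loop
def pvFlushTok (st : List String × Option String) : List String :=
  match st.2 with | some p => st.1 ++ [p] | none => st.1

lemma pv_tok_eq : ∀ (toks : List (List Char)) (ch : List String),
    pvFlushTok (toks.foldl pvTokStep (ch, none)) = ch ++ pvLoopA (toks.map String.ofList)
    ∧ ∀ p : String, (p = "Sph" ∨ p = "Sphe") →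
      pvFlushTok (toks.foldl pvTokStep (ch, some p)) = ch ++ pvLoopA (p :: toks.map String.ofList) := by
  intro toks
  induction toks with
  | nil => intro ch; exact ⟨by simp [pvLoopA, pvFlushTok], fun p _ => by simp [pvLoopA, pvFlushTok]⟩
  | cons t rest ih =>
    intro ch
    constructor
    · simp only [List.foldl_cons, pvTokStep, List.map_cons]
      by_cases hs : (t == "Sph".toList || t == "Sphe".toList) = true
      · rw [if_pos hs]
        have hp : String.ofList t = "Sph" ∨ String.ofList t = "Sphe" := by
          rcases Bool.or_eq_true_iff.mp hs with h | h <;>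
            [left; right] <;> rw [beq_iff_eq.mp h] <;> rfl
        exact (ih ch).2 (String.ofList t) hp
      · rw [if_neg hs]
        rw [(ih (ch ++ [String.ofList t])).1]
        have hA : pvLoopA (String.ofList t :: rest.map String.ofList) =
            String.ofList t :: pvLoopA (rest.map String.ofList) := by
          cases hr : rest.map String.ofList with
          | nil => rfl
          | cons q qs =>
            simp only [pvLoopA]
            rw [if_neg]
            simp only [pv_ofList_beq, Bool.and_eq_true, Bool.or_eq_true] at *
            intro hcon
            exact hs (by simpa using hcon.1)
        rw [hA]
        simp
    · intro p hp
      simp only [List.foldl_cons, pvTokStep, List.map_cons]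
      have hpS : ((p == "Sph") || (p == "Sphe")) = true := by
        rcases hp with rfl | rfl <;> decide
      by_cases hLR : (t == "L".toList || t == "R".toList) = true
      · rw [if_pos hLR]
        rw [(ih (ch ++ [p ++ "-" ++ String.ofList t])).1]
        have : pvLoopA (p :: String.ofList t :: rest.map String.ofList) =
            (p ++ "-" ++ String.ofList t) :: pvLoopA (rest.map String.ofList) := by
          simp only [pvLoopA]
          rw [if_pos]
          simp only [pv_ofList_beq, Bool.and_eq_true]
          exact ⟨hpS, hLR⟩
        rw [this]
        simp
      · rw [if_neg hLR]
        have hnotmerge : (((p == "Sph") || (p == "Sphe")) &&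
            ((String.ofList t == "L") || (String.ofList t == "R"))) = false := by
          simp only [pv_ofList_beq]
          simp only [Bool.and_eq_false_iff]
          right
          exact (Bool.not_eq_true _).mp hLR
        by_cases hs : (t == "Sph".toList || t == "Sphe".toList) = true
        · rw [if_pos hs]
          have hq : String.ofList t = "Sph" ∨ String.ofList t = "Sphe" := by
            rcases Bool.or_eq_true_iff.mp hs with h | h <;>
              [left; right] <;> rw [beq_iff_eq.mp h] <;> rfl
          rw [(ih (ch ++ [p])).2 (String.ofList t) hq]
          have : pvLoopA (p :: String.ofList t :: rest.map String.ofList) =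
              p :: pvLoopA (String.ofList t :: rest.map String.ofList) := by
            simp only [pvLoopA]
            rw [if_neg (by simp [hnotmerge])]
          rw [this]
          simp
        · rw [if_neg hs]
          rw [(ih (ch ++ [p, String.ofList t])).1]
          have h2 : pvLoopA (String.ofList t :: rest.map String.ofList) =
              String.ofList t :: pvLoopA (rest.map String.ofList) := by
            cases hr : rest.map String.ofList with
            | nil => rfl
            | cons q qs =>
              simp only [pvLoopA]
              rw [if_neg]
              simp only [pv_ofList_beq, Bool.and_eq_true, Bool.or_eq_true] at *
              intro hcon
              exact hs (by simpa using hcon.1)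
          have h1 : pvLoopA (p :: String.ofList t :: rest.map String.ofList) =
              p :: pvLoopA (String.ofList t :: rest.map String.ofList) := by
            simp only [pvLoopA]
            rw [if_neg (by simp [hnotmerge])]
          rw [h1, h2]
          simp

-- the whole pipeline agrees for any suffix string
lemma pv_suffix_eq (s : String) :
    pvFinishB ((s.toList ++ ['_']).foldl pvStepB ([], [], none)) =
      pvLoopA ((PySem.Str.split? s "_").getD []) := by
  have hsplit : (PySem.Str.split? s "_").getD [] = (pvSplit [] s.toList).map String.ofList := by
    simp [PySem.Str.split?, PySem.Chars.split?, pv_splitOn_eq]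
  rw [hsplit, pv_machine_eq s.toList [] [] none]
  have h := (pv_tok_eq (pvSplit [] s.toList) []).1
  simpa [pvFinishB, pvFlushTok] using h

-- ===== VERDICT (by name: the statement is the Claim_ definition above) =====
theorem parse_channel_names_from_filename_spec : Claim_equal_parse_channel_names_from_filename := by
  intro filename _
  unfold Spec_parse_channel_names_from_filename
  unfold parse_channel_names_from_filename parse_channel_names_from_filename_alt
  by_cases h : PySem.Str.isIn "_fast_reject_" (PySem.Str.replace filename ".set" "") = true
  · simp only [h, if_true]
    exact (pv_suffix_eq _).symm
  · simp only [Bool.not_eq_true] at h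
    simp only [h, Bool.false_eq_true, if_false]
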